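-- pv_equiv track=rewrite | github.com/pwmcclung/newCodeProbs | nadir.py | recurrence
-- ===== SOURCE A (Python) =====
-- def recurrence(values):
--     nadir = min(values)
--     nadir_index = values.index(nadir)
--
--     after_nadir = values[nadir_index:]
--
--     if len(after_nadir) < 4:
--         return False
--
--     count = 0
--     for i in range(1, len(after_nadir)):
--         if after_nadir[i] > after_nadir[i-1]:
--             count += 1
--             if count >= 3:
--                 return True
--         else:
--             count = 0
--     return False
-- ===== SOURCE B (Python) =====
-- def recurrence(values):
--     m = min(values)
--     past_min = False
--     for a, b, c, d in zip(values, values[1:], values[2:], values[3:]):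
--         past_min = past_min or a == m
--         if past_min and a < b < c < d:
--             return True
--     return False
-- ===== Notes on version B (the rewrite author's own statement) =====
-- stated objective: alternative
-- what changed: Fuses min-occurrence detection and rise detection into one pass over 4-element windows with chained comparisons, eliminating index(), the slice, the length guard and the reset counter.
import Mathlib
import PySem

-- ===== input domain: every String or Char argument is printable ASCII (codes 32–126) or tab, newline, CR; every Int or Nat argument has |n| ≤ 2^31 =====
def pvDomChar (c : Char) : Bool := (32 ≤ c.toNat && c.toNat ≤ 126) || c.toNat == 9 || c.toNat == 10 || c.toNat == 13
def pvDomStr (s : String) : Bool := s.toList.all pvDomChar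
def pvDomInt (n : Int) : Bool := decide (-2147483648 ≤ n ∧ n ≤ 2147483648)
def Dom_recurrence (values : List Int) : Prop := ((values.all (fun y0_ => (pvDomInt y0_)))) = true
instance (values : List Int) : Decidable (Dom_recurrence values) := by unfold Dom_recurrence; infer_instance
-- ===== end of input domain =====

-- B replaces A's index()/slice/reset-counter pipeline with a single fused pass over
-- 4-element windows using chained comparisons and a past-the-minimum flag (return value only).

-- ===== PORT A =====
-- the 'for i in range(1, len(after_nadir))' loop with its count accumulator:
-- prev is after_nadir[i-1], count is the running counter
def recLoopA (prev : Int) (count : Int) : List Int → Bool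
  | [] => false
  | x :: xs =>
    if prev < x then
      if count + 1 ≥ 3 then true else recLoopA x (count + 1) xs
    else recLoopA x 0 xs

def recurrence (values : List Int) : Bool :=
  match PySem.List.min? values (fun y => y) with
  | none => false      -- Python raises ValueError on empty input (excluded by Pre_)
  | some nadir =>
    match PySem.List.index? values nadir with
    | none => false    -- unreachable: the minimum is a member
    | some nadirIndex =>
      let afterNadir := PySem.List.slice values (some (nadirIndex : Int)) none
      if afterNadir.length < 4 then false
      else
        match afterNadir with
        | [] => false
        | h :: t => recLoopA h 0 t

-- ===== PORT B =====
-- 'for a, b, c, d in zip(values, values[1:], values[2:], values[3:])' with the past_min flag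
def bLoop (m : Int) (pastMin : Bool) : List Int → Bool
  | a :: b :: c :: d :: rest =>
    let p := pastMin || (a == m)
    if p && (decide (a < b) && (decide (b < c) && decide (c < d))) then true
    else bLoop m p (b :: c :: d :: rest)
  | _ => false

def recurrence_alt (values : List Int) : Bool :=
  match PySem.List.min? values (fun y => y) with
  | none => false      -- Python raises ValueError on empty input (excluded by Pre_)
  | some m => bLoop m false values

-- ===== PRECONDITION & SPEC =====
-- Pre_ excludes only the empty list, on which A's min(values) raises ValueError (B raises too).
def Pre_recurrence (values : List Int) : Prop := values ≠ []
instance (values : List Int) : Decidable (Pre_recurrence values) := by unfold Pre_recurrence; infer_instance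
def pvWitness_recurrence : List Int := ([3, 0, 1, 2, 3])

def Spec_recurrence (values : List Int) (out : Bool) : Prop := out = recurrence_alt values
instance (values : List Int) (out : Bool) : Decidable (Spec_recurrence values out) := by unfold Spec_recurrence; infer_instance

-- ===== CLAIM (what is proved, stated in full; the proofs are below) =====
def Claim_equal_recurrence : Prop := ∀ (values : List Int), Dom_recurrence values → Pre_recurrence values → Spec_recurrence values (recurrence values)

-- ===== LEMMAS AND PROOFS =====

-- proof-side helpers: the common value both loops compute — win3 over the pairwise 'ups'
def upsOf (tail : List Int) : List Bool :=
  List.zipWith (fun a b => decide (a < b)) tail tail.tail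

def win3 : List Bool → Bool
  | a :: b :: c :: rest => (a && b && c) || win3 (b :: c :: rest)
  | _ => false

-- win3 ignores a leading false
theorem win3_false_cons (t : List Bool) : win3 (false :: t) = win3 t := by
  match t with
  | [] => rfl
  | [x] => rfl
  | x :: y :: r => simp [win3]

theorem win3_true_false_cons (t : List Bool) : win3 (true :: false :: t) = win3 t := by
  match t with
  | [] => rfl
  | [x] => rfl
  | x :: y :: r => simp [win3]

theorem win3_true_true_false_cons (t : List Bool) :
    win3 (true :: true :: false :: t) = win3 t := by
  simp [win3, win3_true_false_cons]

-- dropping up to two leading trues followed by a false does not change win3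
theorem win3_replicate_false (c : Nat) (hc : c ≤ 2) (t : List Bool) :
    win3 (List.replicate c true ++ false :: t) = win3 t := by
  interval_cases c
  · exact win3_false_cons t
  · exact win3_true_false_cons t
  · exact win3_true_true_false_cons t

-- A's loop invariant: the counter loop is win3 with the counter materialised as leading trues
theorem recLoopA_eq_win3 (rest : List Int) : ∀ (prev : Int) (c : Int), 0 ≤ c → c ≤ 2 →
    recLoopA prev c rest =
      win3 (List.replicate c.toNat true ++
            List.zipWith (fun a b => decide (a < b)) (prev :: rest) rest) := by
  induction rest with
  | nil =>
    intro prev c hc0 hc2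
    have : c.toNat ≤ 2 := by omega
    interval_cases h : c.toNat <;> simp [recLoopA, win3]
  | cons x xs ih =>
    intro prev c hc0 hc2
    by_cases hlt : prev < x
    · by_cases hge : c + 1 ≥ 3
      · have hc : c = 2 := by omega
        subst hc
        simp [recLoopA, hlt, win3, List.replicate]
      · have h1 : (c + 1).toNat = c.toNat + 1 := by omega
        have key := ih x (c + 1) (by omega) (by omega)
        calc recLoopA prev c (x :: xs)
            = recLoopA x (c + 1) xs := by simp [recLoopA, hlt, hge]
          _ = win3 (List.replicate (c + 1).toNat true ++
                List.zipWith (fun a b => decide (a < b)) (x :: xs) xs) := key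
          _ = win3 (List.replicate c.toNat true ++
                List.zipWith (fun a b => decide (a < b)) (prev :: x :: xs) (x :: xs)) := by
                rw [h1, List.replicate_succ']
                simp [List.zipWith, hlt]
    · have key := ih x 0 le_rfl (by omega)
      calc recLoopA prev c (x :: xs)
          = recLoopA x 0 xs := by simp [recLoopA, hlt]
        _ = win3 (List.zipWith (fun a b => decide (a < b)) (x :: xs) xs) := by
              simpa using key
        _ = win3 (List.replicate c.toNat true ++
              List.zipWith (fun a b => decide (a < b)) (prev :: x :: xs) (x :: xs)) := by
              rw [show List.zipWith (fun a b => decide (a < b)) (prev :: x :: xs) (x :: xs)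
                    = decide (prev < x) :: List.zipWith (fun a b => decide (a < b)) (x :: xs) xs from rfl]
              rw [show (decide (prev < x)) = false by simp [hlt]]
              rw [win3_replicate_false c.toNat (by omega)]

-- win3 of a short list (fewer than three booleans) is false
theorem win3_short (t : List Bool) (h : t.length < 3) : win3 t = false := by
  match t with
  | [] => rfl
  | [a] => rfl
  | [a, b] => rfl
  | a :: b :: c :: r => simp at h; omega

-- A's tail-processing (length guard + counter loop) equals win3 over the ups of the tail
theorem tail_eq (tail : List Int) :
    (if tail.length < 4 then false
     else match tail with
          | [] => false
          | h :: t => recLoopA h 0 t) = win3 (upsOf tail) := by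
  match tail with
  | [] => rfl
  | h :: t =>
    have hups : upsOf (h :: t) = List.zipWith (fun a b => decide (a < b)) (h :: t) t := rfl
    by_cases hlen : (h :: t).length < 4
    · rw [if_pos hlen, hups]
      have : (List.zipWith (fun a b => decide (a < b)) (h :: t) t).length < 3 := by
        rw [List.length_zipWith]
        simp at hlen ⊢
        omega
      exact (win3_short _ this).symm
    · rw [if_neg hlen, hups]
      simpa using recLoopA_eq_win3 t h 0 le_rfl (by norm_num)

-- B's loop with the flag already set equals win3 over the ups
theorem bLoop_true_eq_win3 (m : Int) (l : List Int) : bLoop m true l = win3 (upsOf l) := by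
  induction l with
  | nil => rfl
  | cons a t ih =>
    match t with
    | [] => rfl
    | [b] => rfl
    | [b, c] => rfl
    | b :: c :: d :: r =>
      have hup : upsOf (a :: b :: c :: d :: r) =
          decide (a < b) :: decide (b < c) :: decide (c < d) ::
            List.zipWith (fun x y => decide (x < y)) (d :: r) r := rfl
      have hupt : upsOf (b :: c :: d :: r) =
          decide (b < c) :: decide (c < d) ::
            List.zipWith (fun x y => decide (x < y)) (d :: r) r := rfl
      rw [hup]
      by_cases h1 : a < b
      · by_cases h2 : b < c
        · by_cases h3 : c < d
          · simp [bLoop, h1, h2, h3, win3]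
          · simp only [bLoop, Bool.true_or, Bool.true_and]
            rw [if_neg (by simp [h3])]
            rw [ih, hupt]
            simp [win3, h3]
        · simp only [bLoop, Bool.true_or, Bool.true_and]
          rw [if_neg (by simp [h2])]
          rw [ih, hupt]
          simp [win3, h2]
      · simp only [bLoop, Bool.true_or, Bool.true_and]
        rw [if_neg (by simp [h1])]
        rw [ih, hupt]
        rw [show (decide (a < b)) = false by simp [h1]]
        exact (win3_false_cons _).symm

-- B's loop skips a non-minimum head while the flag is unset
theorem bLoop_skip (m a : Int) (t : List Int) (ha : a ≠ m) :
    bLoop m false (a :: t) = bLoop m false t := by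
  match t with
  | [] => rfl
  | [b] => rfl
  | [b, c] => rfl
  | b :: c :: d :: r =>
    have hm : (a == m) = false := by simp [ha]
    simp [bLoop, hm]

-- …hence a whole prefix free of the minimum
theorem bLoop_prefix (m : Int) (pre t : List Int) (h : ∀ x ∈ pre, x ≠ m) :
    bLoop m false (pre ++ t) = bLoop m false t := by
  induction pre with
  | nil => rfl
  | cons a p ih =>
    rw [List.cons_append, bLoop_skip m a (p ++ t) (h a (by simp))]
    exact ih (fun x hx => h x (by simp [hx]))

-- once the minimum is at the head, the flag becomes (and stays) set
theorem bLoop_head (m : Int) (t : List Int) :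
    bLoop m false (m :: t) = bLoop m true (m :: t) := by
  match t with
  | [] => rfl
  | [b] => rfl
  | [b, c] => rfl
  | b :: c :: d :: r => simp [bLoop]

-- ===== VERDICT (by name: the statement is the Claim_ definition above) =====
theorem recurrence_spec : Claim_equal_recurrence := by
  intro values _ _
  unfold Spec_recurrence recurrence recurrence_alt
  rcases h : PySem.List.min? values (fun y => y) with _ | m
  · rfl
  · rcases h2 : PySem.List.index? values m with _ | idx
    · have hnm : m ∉ values := (PySem.List.index?_eq_none_iff values m).mp h2
      simp only [h2]
      rw [show bLoop m false values = bLoop m false (values ++ []) by rw [List.append_nil]]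
      rw [bLoop_prefix m values [] (fun x hx hxm => hnm (hxm ▸ hx))]
      rfl
    · obtain ⟨pre, suf, hsplit, hlen, hnot⟩ := (PySem.List.index?_eq_some_iff values m idx).mp h2
      simp only [h2]
      rw [PySem.List.slice_from_natCast]
      rw [hsplit, ← hlen, List.drop_left]
      rw [tail_eq (m :: suf)]
      rw [bLoop_prefix m pre (m :: suf) (fun x hx hxm => hnot (hxm ▸ hx))]
      rw [bLoop_head, bLoop_true_eq_win3]
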